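-- pv_equiv track=rewrite | github.com/hariharanragothaman/codeforces-solutions | 1352A-Sum-Of-Round-Numbers.py | sum_of_round_numbers
-- ===== SOURCE A (Python) =====
-- def sum_of_round_numbers(num):
--     res = []
--     num = str(num)
--     j = len(num) - 1
--     for i in range(len(num)):
--         temp = int(num[i]) * (10**j)
--         if temp:
--             res.append(temp)
--         j -= 1
--     return res
-- ===== SOURCE B (Python) =====
-- def sum_of_round_numbers(num):
--     # Pure-arithmetic digit extraction, least-significant first with a running
--     # place multiplier; reversed at the end to match the msb-first order.
--     res = []
--     place = 1
--     while num > 0: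
--         d = num % 10
--         if d:
--             res.append(d * place)
--         num //= 10
--         place *= 10
--     return res[::-1]
-- ===== Notes on version B (the rewrite author's own statement) =====
-- stated objective: alternative
-- what changed: A converts the number to a decimal string and recomputes a fresh power of ten for each character position left-to-right; B never builds a string: it peels digits off arithmetically (modulo and floor division by ten) with a running place multiplier and reverses the collected summands.
import Mathlib
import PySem

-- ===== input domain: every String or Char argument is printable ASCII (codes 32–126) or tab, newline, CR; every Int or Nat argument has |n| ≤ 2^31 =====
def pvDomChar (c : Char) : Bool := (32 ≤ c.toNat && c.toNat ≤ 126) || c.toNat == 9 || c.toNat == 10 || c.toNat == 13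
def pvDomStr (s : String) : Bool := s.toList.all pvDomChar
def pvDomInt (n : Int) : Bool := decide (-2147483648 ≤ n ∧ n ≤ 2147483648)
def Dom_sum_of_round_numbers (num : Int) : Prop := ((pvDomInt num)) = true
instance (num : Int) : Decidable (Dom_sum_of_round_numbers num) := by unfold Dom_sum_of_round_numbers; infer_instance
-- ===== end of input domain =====

-- B replaces A's string walk (str(num), int(num[i]) * 10**j left-to-right) by pure
-- arithmetic digit peeling with a running place multiplier; alternative algorithm, same results.

-- ===== PORT A =====
-- int(num[i]) for a one-character string; total form .getD 0 is only relied on under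
-- Pre_ (num ≥ 0), where every character of str(num) is a digit and ofChars? is some.
def digOf (c : Char) : Int := (PySem.Int.ofChars? [c]).getD 0

-- Literal port of A: s = str(num) (as its character list, exact by Int.toList_toStr),
-- j starts at len(s)-1 and is decremented each iteration; temp = int(s[i]) * 10**j.
-- j.toNat is exact here because j ≥ 0 throughout the iterations reached under Pre_.
def sum_of_round_numbers (num : Int) : List Int :=
  let s := PySem.Int.toChars num
  let r := (PySem.List.pyRange 0 (PySem.List.len s) 1).foldl
    (fun (st : List Int × Int) i =>
      let temp := digOf (PySem.List.pyGetD s i ' ') * (10 : Int) ^ (st.2.toNat)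
      ((if temp ≠ 0 then st.1 ++ [temp] else st.1), st.2 - 1))
    ([], PySem.List.len s - 1)
  r.1

-- ===== PORT B =====
-- the while-loop of Source B; num.toNat is exact because the loop runs only while the number
-- is positive (otherwise Source B and this port both return the initial accumulator unchanged).
def altGo (n : Nat) (place : Int) (res : List Int) : List Int :=
  if h : n = 0 then res
  else altGo (n / 10) (place * 10)
        (if n % 10 ≠ 0 then res ++ [((n % 10 : Nat) : Int) * place] else res)
  termination_by n
  decreasing_by exact Nat.div_lt_self (Nat.pos_of_ne_zero h) (by omega)

def sum_of_round_numbers_alt (num : Int) : List Int :=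
  (altGo num.toNat 1 []).reverse

-- ===== PRECONDITION & SPEC =====
-- Pre_ excludes exactly the negative inputs: there str(num) starts with a minus sign and
-- A raises ValueError when int() is applied to that character.
def Pre_sum_of_round_numbers (num : Int) : Prop := 0 ≤ num
instance (num : Int) : Decidable (Pre_sum_of_round_numbers num) := by unfold Pre_sum_of_round_numbers; infer_instance
def pvWitness_sum_of_round_numbers : Int := (1024)

def Spec_sum_of_round_numbers (num : Int) (out : List Int) : Prop := out = sum_of_round_numbers_alt num
instance (num : Int) (out : List Int) : Decidable (Spec_sum_of_round_numbers num out) := by unfold Spec_sum_of_round_numbers; infer_instance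

-- ===== CLAIM (what is proved, stated in full; the proofs are below) =====
def Claim_equal_sum_of_round_numbers : Prop := ∀ (num : Int), Dom_sum_of_round_numbers num → Pre_sum_of_round_numbers num → Spec_sum_of_round_numbers num (sum_of_round_numbers num)

-- ===== LEMMAS AND PROOFS =====

-- recursive characterisation of Nat.toDigits 10 (msb-first decimal digits)
def tdc (n : Nat) : List Char :=
  if h : n < 10 then [Nat.digitChar n]
  else tdc (n / 10) ++ [Nat.digitChar (n % 10)]
  termination_by n
  decreasing_by exact Nat.div_lt_self (by omega) (by omega)

lemma toDigitsCore_eq_tdc : ∀ (f n : Nat) (acc : List Char), n < f →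
    Nat.toDigitsCore 10 f n acc = tdc n ++ acc := by
  intro f
  induction f with
  | zero => omega
  | succ f ih =>
    intro n acc h
    rw [Nat.toDigitsCore]
    by_cases h0 : n / 10 = 0
    · have hn : n < 10 := by omega
      simp only [h0, if_true]
      rw [tdc]
      simp [hn, Nat.mod_eq_of_lt hn]
    · simp only [h0, if_false]
      have hn : ¬ n < 10 := by omega
      rw [ih (n / 10) _ (by omega)]
      conv_rhs => rw [tdc]
      simp [hn]

lemma toDigits_eq_tdc (n : Nat) : Nat.toDigits 10 n = tdc n := by
  rw [Nat.toDigits]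
  simpa using toDigitsCore_eq_tdc (n + 1) n [] (by omega)

lemma digOf_digitChar (d : Nat) (h : d < 10) : digOf (Nat.digitChar d) = (d : Int) := by
  interval_cases d <;> decide

-- B's helper: what altGo computes (msb-first summand list M, built here)
def M (n : Nat) (p : Int) : List Int :=
  if h : n = 0 then []
  else M (n / 10) (p * 10) ++ (if n % 10 ≠ 0 then [((n % 10 : Nat) : Int) * p] else [])
  termination_by n
  decreasing_by exact Nat.div_lt_self (Nat.pos_of_ne_zero h) (by omega)

lemma altGo_eq_M : ∀ (n : Nat) (p : Int) (res : List Int),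
    altGo n p res = res ++ (M n p).reverse := by
  intro n
  induction n using Nat.strong_induction_on with
  | _ n ih =>
    intro p res
    rw [altGo, M]
    by_cases h : n = 0
    · simp [h]
    · simp only [h, dite_false]
      rw [ih (n / 10) (Nat.div_lt_self (Nat.pos_of_ne_zero h) (by omega))]
      by_cases hd : n % 10 ≠ 0 <;> simp [hd]

lemma alt_eq_M (num : Int) : sum_of_round_numbers_alt num = M num.toNat 1 := by
  rw [sum_of_round_numbers_alt, altGo_eq_M]
  simp

-- A's right-to-left reading of a character list with place multiplier p
def Kr : List Char → Int → List Int
  | [], _ => []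
  | c :: rest, p => Kr rest (p * 10) ++ (if digOf c ≠ 0 then [digOf c * p] else [])

lemma M_eq_Kr : ∀ (n : Nat) (p : Int), M n p = Kr (tdc n).reverse p := by
  intro n
  induction n using Nat.strong_induction_on with
  | _ n ih =>
    intro p
    rw [M, tdc]
    by_cases h10 : n < 10
    · simp only [h10, dite_true, List.reverse_singleton, Kr]
      rw [digOf_digitChar n h10]
      by_cases h : n = 0
      · simp [h]
      · have h1 : n % 10 = n := Nat.mod_eq_of_lt h10
        have h2 : n / 10 = 0 := Nat.div_eq_of_lt h10
        rw [h2, M]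
        simp [h, h1]
    · have h : ¬ n = 0 := by omega
      simp only [h10, dite_false, h, List.reverse_append, List.reverse_singleton,
        List.singleton_append, Kr]
      rw [ih (n / 10) (Nat.div_lt_self (by omega) (by omega)) (p * 10)]
      rw [digOf_digitChar (n % 10) (Nat.mod_lt n (by omega))]
      norm_cast

-- A's indexed fold, unrolled from the right
lemma fold_spec (cs : List Char) : ∀ (m : Nat) (acc : List Int) (j0 : Int),
    List.foldl
      (fun (st : List Int × Int) i =>
        ((if digOf (PySem.List.pyGetD cs i ' ') * (10 : Int) ^ (st.2.toNat) ≠ 0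
            then st.1 ++ [digOf (PySem.List.pyGetD cs i ' ') * (10 : Int) ^ (st.2.toNat)]
            else st.1), st.2 - 1))
      (acc, j0) ((List.range m).map Int.ofNat)
    = (acc ++ (List.range m).flatMap (fun i =>
          if digOf (cs.getD i ' ') * (10 : Int) ^ ((j0 - i).toNat) ≠ 0
            then [digOf (cs.getD i ' ') * (10 : Int) ^ ((j0 - i).toNat)] else []), j0 - m) := by
  intro m
  induction m with
  | zero => simp
  | succ m ih =>
    intro acc j0
    rw [List.range_succ, List.map_append, List.foldl_append, ih]
    simp only [List.map_cons, List.map_nil, List.foldl_cons, List.foldl_nil,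
      List.flatMap_append, List.flatMap_cons, List.flatMap_nil, List.append_nil]
    have hg : PySem.List.pyGetD cs (Int.ofNat m) ' ' = cs.getD m ' ' := by
      simpa using PySem.List.pyGetD_natCast cs m ' '
    have hj : (Int.ofNat m : Int) = (m : Int) := rfl
    rw [hg]
    split_ifs with ht <;> rw [Prod.mk.injEq] <;>
      exact ⟨by simp [List.append_assoc], by push_cast; omega⟩

lemma flatMap_eq_Kr : ∀ (cs : List Char) (p : Int), p ≠ 0 →
    ((List.range cs.length).flatMap (fun i =>
        let t := digOf (cs.getD i ' ') * p * (10 : Int) ^ (cs.length - 1 - i)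
        if t ≠ 0 then [t] else []))
    = Kr cs.reverse p := by
  intro cs
  induction cs using List.reverseRecOn with
  | nil => intro p _; simp [Kr]
  | append_singleton cs c ih =>
    intro p hp
    rw [List.reverse_append, List.reverse_singleton, List.singleton_append, Kr,
      ← ih (p * 10) (by simp [hp])]
    simp only [List.length_append, List.length_singleton, List.range_succ,
      List.flatMap_append, List.flatMap_cons, List.flatMap_nil, List.append_nil]
    have h1 : ∀ i ∈ List.range cs.length,
        (let t := digOf ((cs ++ [c]).getD i ' ') * p * (10 : Int) ^ (cs.length + 1 - 1 - i)
         if t ≠ 0 then [t] else [])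
        = (let t := digOf (cs.getD i ' ') * (p * 10) * (10 : Int) ^ (cs.length - 1 - i)
           if t ≠ 0 then [t] else []) := by
      intro i hi
      rw [List.mem_range] at hi
      have hget : (cs ++ [c]).getD i ' ' = cs.getD i ' ' := by
        unfold List.getD
        rw [List.getElem?_append_left hi]
      have hexp : cs.length + 1 - 1 - i = (cs.length - 1 - i) + 1 := by omega
      simp only [hget, hexp, pow_succ]
      ring_nf
    rw [List.flatMap_congr h1]
    have hget : (cs ++ [c]).getD cs.length ' ' = c := by
      unfold List.getD
      rw [List.getElem?_append_right (le_refl _)]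
      simp
    simp only [hget, Nat.add_sub_cancel, Nat.sub_self, pow_zero, mul_one]
    by_cases hc : digOf c = 0 <;> simp [hc, hp]

lemma Kr_eq_A (num : Int) (h : 0 ≤ num) :
    sum_of_round_numbers num = Kr (PySem.Int.toChars num).reverse 1 := by
  rw [sum_of_round_numbers]
  have hlen : PySem.List.len (PySem.Int.toChars num) = ((PySem.Int.toChars num).length : Int) :=
    PySem.List.len_eq _
  rw [hlen, PySem.List.pyRange_zero_natCast]
  refine (congrArg Prod.fst (fold_spec (PySem.Int.toChars num)
    (PySem.Int.toChars num).length [] (((PySem.Int.toChars num).length : Int) - 1))).trans ?_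
  rw [← flatMap_eq_Kr _ 1 one_ne_zero]
  simp only [List.nil_append]
  apply List.flatMap_congr
  intro i hi
  rw [List.mem_range] at hi
  have he : ((((PySem.Int.toChars num).length : Int) - 1 - (i : Int))).toNat
      = (PySem.Int.toChars num).length - 1 - i := by omega
  simp only [he, mul_one]

-- ===== VERDICT (by name: the statement is the Claim_ definition above) =====
theorem sum_of_round_numbers_spec : Claim_equal_sum_of_round_numbers := by
  intro num _ hpre
  unfold Spec_sum_of_round_numbers
  rw [Kr_eq_A num hpre, alt_eq_M, M_eq_Kr]
  unfold Pre_sum_of_round_numbers at hpre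
  have hnn : ¬ num < 0 := by omega
  rw [PySem.Int.toChars]
  simp [hnn, toDigits_eq_tdc]
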